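-- pv_equiv track=rewrite | github.com/ztwang0201/ATSG_Generation | ATSG_with_NetworkX/ATSG_expansion.py | load_ob_max_index
-- ===== SOURCE A (Python) =====
-- def load_ob_max_index(ob_name_and_index):
--     ob_max_index_dict = {}
--     max_index = 1
--     for item in ob_name_and_index:
--         object_name = item[0]
--         object_index = item[1]
--
--         if object_index > max_index:
--             max_index = object_index
--         ob_max_index_dict.update([(object_name, max_index)])
--
--     # pprint(ob_max_index_dict)
--     return ob_max_index_dict
-- ===== SOURCE B (Python) =====
-- def load_ob_max_index(ob_name_and_index):
--     # stage 1: record the position of each name's last occurrence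
--     last = {}
--     for pos, item in enumerate(ob_name_and_index):
--         last[item[0]] = pos
--     # stage 2: prefix maxima of the indices, seeded at 1
--     pref = []
--     m = 1
--     for item in ob_name_and_index:
--         if item[1] > m:
--             m = item[1]
--         pref.append(m)
--     # stage 3: each name gets the prefix maximum at its last occurrence
--     return {name: pref[pos] for name, pos in last.items()}
-- ===== Notes on version B (the rewrite author's own statement) =====
-- stated objective: alternative
-- what changed: A interleaves a running-max update with incremental dict overwrites in one stateful pass; B is staged: it first builds a last-occurrence position index and a prefix-maxima array, then constructs the result dict directly from the distinct names by indexing the array at each name's last position (no value overwriting).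
import Mathlib
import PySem

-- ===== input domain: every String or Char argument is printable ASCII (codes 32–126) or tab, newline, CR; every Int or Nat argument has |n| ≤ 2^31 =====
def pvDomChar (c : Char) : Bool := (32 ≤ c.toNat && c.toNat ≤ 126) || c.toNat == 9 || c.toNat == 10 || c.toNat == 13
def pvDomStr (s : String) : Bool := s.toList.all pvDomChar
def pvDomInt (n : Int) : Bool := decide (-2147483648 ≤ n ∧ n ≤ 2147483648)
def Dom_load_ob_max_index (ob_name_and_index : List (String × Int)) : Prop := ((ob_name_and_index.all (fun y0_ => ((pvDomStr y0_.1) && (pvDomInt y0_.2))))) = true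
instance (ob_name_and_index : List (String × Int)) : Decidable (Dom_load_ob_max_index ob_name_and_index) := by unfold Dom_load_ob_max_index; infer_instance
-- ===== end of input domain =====

-- B replaces A's single stateful loop (running max + incremental dict overwrites) by three stages:
-- a last-occurrence position index, a prefix-maxima array, and a direct dict build; objective: alternative decomposition, same cost.

-- ===== PORT A =====
-- single loop carrying (dict, max_index); dict.update([(k,v)]) = insert (overwrite keeps position)
def load_ob_max_index (ob_name_and_index : List (String × Int)) : List (String × Int) :=
  (ob_name_and_index.foldl
    (fun (st : PySem.Dict String Int × Int) item =>
      let max_index := if item.2 > st.2 then item.2 else st.2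
      (st.1.insert item.1 max_index, max_index))
    (PySem.Dict.empty, 1)).1.items

-- ===== PORT B =====
-- stage 1: last[item[0]] = pos over enumerate; stage 2: prefix maxima seeded at 1;
-- stage 3: {name: pref[pos] for name, pos in last.items()} = fold of insert over last.items
def load_ob_max_index_alt (ob_name_and_index : List (String × Int)) : List (String × Int) :=
  let last := (PySem.List.enumerate ob_name_and_index).foldl
    (fun (d : PySem.Dict String Int) p => d.insert p.2.1 p.1) PySem.Dict.empty
  let pref := (ob_name_and_index.foldl
    (fun (st : List Int × Int) item =>
      let m := if item.2 > st.2 then item.2 else st.2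
      (st.1 ++ [m], m)) ([], 1)).1
  (last.items.foldl
    (fun (d : PySem.Dict String Int) p => d.insert p.1 (PySem.List.pyGetD pref p.2 0))
    PySem.Dict.empty).items


-- ===== PRECONDITION & SPEC =====
def Spec_load_ob_max_index (ob_name_and_index : List (String × Int)) (out : List (String × Int)) : Prop := out = load_ob_max_index_alt ob_name_and_index
instance (ob_name_and_index : List (String × Int)) (out : List (String × Int)) : Decidable (Spec_load_ob_max_index ob_name_and_index out) := by unfold Spec_load_ob_max_index; infer_instance

-- ===== CLAIM (what is proved, stated in full; the proofs are below) =====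
def Claim_equal_load_ob_max_index : Prop := ∀ (ob_name_and_index : List (String × Int)), Dom_load_ob_max_index ob_name_and_index → Spec_load_ob_max_index ob_name_and_index (load_ob_max_index ob_name_and_index)

-- ===== LEMMAS AND PROOFS =====

def pvStepA (st : PySem.Dict String Int × Int) (item : String × Int) : PySem.Dict String Int × Int :=
  let max_index := if item.2 > st.2 then item.2 else st.2
  (st.1.insert item.1 max_index, max_index)

def pvStepP (st : List Int × Int) (item : String × Int) : List Int × Int :=
  let m := if item.2 > st.2 then item.2 else st.2
  (st.1 ++ [m], m)

lemma pv_enumerate_append (xs : List (String × Int)) (x : String × Int) (s : Int) :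
    PySem.List.enumerate (xs ++ [x]) s
      = PySem.List.enumerate xs s ++ [((s + xs.length : Int), x)] := by
  induction xs generalizing s with
  | nil => simp [PySem.List.enumerate_cons, PySem.List.enumerate_nil]
  | cons y t ih =>
    simp [PySem.List.enumerate_cons, ih]
    ring_nf

lemma pv_pyGetD_append (l : List Int) (a : Int) (i : Int) (h0 : 0 ≤ i) (h1 : i < (l.length : Int)) :
    PySem.List.pyGetD (l ++ [a]) i 0 = PySem.List.pyGetD l i 0 := by
  rw [PySem.List.pyGetD_eq_getElem (l ++ [a]) 0 h0 (by simp; omega),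
      PySem.List.pyGetD_eq_getElem l 0 h0 h1]
  exact List.getElem_append_left (by omega)

lemma pv_pyGetD_last (l : List Int) (a : Int) :
    PySem.List.pyGetD (l ++ [a]) (l.length : Int) 0 = a := by
  rw [PySem.List.pyGetD_natCast]
  simp [List.getD_eq_getElem?_getD]

lemma pv_main (xs : List (String × Int)) :
    let A := xs.foldl pvStepA (PySem.Dict.empty, (1 : Int))
    let P := xs.foldl pvStepP (([] : List Int), (1 : Int))
    let L := (PySem.List.enumerate xs).foldl
      (fun (d : PySem.Dict String Int) p => d.insert p.2.1 p.1) PySem.Dict.empty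
    A.2 = P.2 ∧ P.1.length = xs.length ∧ L.keys.Nodup ∧
    (∀ p ∈ L.items, 0 ≤ p.2 ∧ p.2 < (xs.length : Int)) ∧
    A.1.items = L.items.map (fun p => (p.1, PySem.List.pyGetD P.1 p.2 0)) := by
  induction xs using List.reverseRecOn with
  | nil => simp [PySem.List.enumerate_nil, PySem.Dict.empty]
  | append_singleton t x ih =>
    obtain ⟨hm, hlen, hnd, hbnd, hitems⟩ := ih
    simp only [List.foldl_append, List.foldl_cons, List.foldl_nil, pv_enumerate_append]
    set A := t.foldl pvStepA (PySem.Dict.empty, (1 : Int)) with hA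
    set P := t.foldl pvStepP (([] : List Int), (1 : Int)) with hP
    set L := (PySem.List.enumerate t).foldl
      (fun (d : PySem.Dict String Int) p => d.insert p.2.1 p.1) PySem.Dict.empty with hL
    simp only [pvStepA, pvStepP]
    rw [hm]
    set M := if x.2 > P.2 then x.2 else P.2 with hM
    have hkeys : A.1.keys = L.keys := by
      simp only [PySem.Dict.keys, hitems, List.map_map]
      rfl
    have hcont : A.1.contains x.1 = L.contains x.1 := by
      rcases h : L.contains x.1 with _ | _
      · rw [Bool.eq_false_iff]
        intro hc
        rw [PySem.Dict.contains_iff_mem_keys, hkeys, ← PySem.Dict.contains_iff_mem_keys] at hc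
        simp [hc] at h
      · rw [PySem.Dict.contains_iff_mem_keys, hkeys, ← PySem.Dict.contains_iff_mem_keys]
        exact h
    refine ⟨rfl, by simp [hlen], ?_, ?_, ?_⟩
    · exact PySem.Dict.nodup_keys_insert _ _ _ hnd
    · intro p hp
      rw [PySem.Dict.mem_items_insert] at hp
      rcases hp with hp | ⟨hp, -⟩
      · subst hp
        constructor <;> simp
      · have := hbnd p hp
        simp only [List.length_append, List.length_cons, List.length_nil]
        push_cast
        omega
    · rcases h : L.contains x.1 with _ | _
      · rw [PySem.Dict.items_insert_of_not_contains _ _ (hcont.trans h),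
            PySem.Dict.items_insert_of_not_contains _ _ h, List.map_append]
        refine congrArg₂ (· ++ ·) ?_ ?_
        · rw [hitems]
          apply List.map_congr_left
          intro p hp
          have hb := hbnd p hp
          rw [pv_pyGetD_append P.1 M p.2 hb.1 (by rw [hlen]; exact hb.2)]
        · simp only [List.map_cons, List.map_nil, zero_add]
          rw [← hlen, pv_pyGetD_last]
      · rw [PySem.Dict.items_insert_of_contains _ _ (hcont.trans h),
            PySem.Dict.items_insert_of_contains _ _ h]
        rw [hitems, List.map_map, List.map_map]
        apply List.map_congr_left
        intro p hp
        have hb := hbnd p hp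
        simp only [Function.comp_apply]
        by_cases hpk : p.1 = x.1
        · have he : (p.1 == x.1) = true := by simpa using hpk
          simp only [he, if_true]
          rw [show ((0:Int) + (t.length : Int)) = ((P.1.length : Int)) by rw [hlen]; ring,
              pv_pyGetD_last]
        · have hne : (p.1 == x.1) = false := by simpa using hpk
          simp only [hne, Bool.false_eq_true, if_false]
          rw [pv_pyGetD_append P.1 M p.2 hb.1 (by rw [hlen]; exact hb.2)]

theorem pv_equal (xs : List (String × Int)) :
    load_ob_max_index xs = load_ob_max_index_alt xs := by
  obtain ⟨hm, hlen, hnd, hbnd, hitems⟩ := pv_main xs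
  show (xs.foldl pvStepA (PySem.Dict.empty, 1)).1.items = _
  unfold load_ob_max_index_alt
  rw [show (xs.foldl (fun (st : List Int × Int) item =>
      let m := if item.2 > st.2 then item.2 else st.2
      (st.1 ++ [m], m)) ([], 1)) = xs.foldl pvStepP ([], 1) from rfl]
  rw [PySem.Dict.items_foldl_insert_fresh _ Prod.fst
        (fun p => PySem.List.pyGetD (xs.foldl pvStepP ([], 1)).1 p.2 0) _
        (fun a _ => PySem.Dict.contains_empty _)
        (by exact hnd)]
  simpa using hitems

-- ===== VERDICT (by name: the statement is the Claim_ definition above) =====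
theorem load_ob_max_index_spec : Claim_equal_load_ob_max_index := by
  intro xs _
  unfold Spec_load_ob_max_index
  exact pv_equal xs
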